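-- pv_equiv track=rewrite | github.com/sony/nnabla | python/src/nnabla/utils/converter/onnx/reader.py | check_padding
-- ===== SOURCE A (Python) =====
-- def check_padding(pads, dim, padval):
--     """Check each padding start/end value
--     and set the sufficient pad value.
--     If we have asymmetry padding, we will return
--     True to indicate the need for a separate padding function"""
--     asymmetry = False
--     for i in range(dim):
--         s = pads[i]
--         e = pads[i+dim]
--         if s == e:
--             padval.append(s)
--         else:
--             asymmetry = True
--             # We must add a separate pad function for asymmetry padding.
--             # Since the pad function will do all the padding,
--             # we will remove all padding here.
--             del padval[:]
--             padval.extend([0]*dim)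
--             break
--     return asymmetry
-- ===== SOURCE B (Python) =====
-- def check_padding(pads, dim, padval):
--     """Check each padding start/end value
--     and set the sufficient pad value.
--     If we have asymmetry padding, we will return
--     True to indicate the need for a separate padding function"""
--     n = max(dim, 0)
--     starts = pads[:n]
--     ends = pads[n:2 * n]
--     if starts == ends:
--         padval.extend(starts)
--         return False
--     del padval[:]
--     padval.extend([0] * n)
--     return True
-- ===== Notes on version B (the rewrite author's own statement) =====
-- stated objective: simpler
-- what changed: A's fused index loop that compares pads[i]/pads[i+dim] while appending to padval and breaking on the first mismatch is replaced by one whole-list comparison of the two slices pads[:dim] and pads[dim:2*dim], followed by a single branch that builds padval; no index loop remains.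
import Mathlib
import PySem

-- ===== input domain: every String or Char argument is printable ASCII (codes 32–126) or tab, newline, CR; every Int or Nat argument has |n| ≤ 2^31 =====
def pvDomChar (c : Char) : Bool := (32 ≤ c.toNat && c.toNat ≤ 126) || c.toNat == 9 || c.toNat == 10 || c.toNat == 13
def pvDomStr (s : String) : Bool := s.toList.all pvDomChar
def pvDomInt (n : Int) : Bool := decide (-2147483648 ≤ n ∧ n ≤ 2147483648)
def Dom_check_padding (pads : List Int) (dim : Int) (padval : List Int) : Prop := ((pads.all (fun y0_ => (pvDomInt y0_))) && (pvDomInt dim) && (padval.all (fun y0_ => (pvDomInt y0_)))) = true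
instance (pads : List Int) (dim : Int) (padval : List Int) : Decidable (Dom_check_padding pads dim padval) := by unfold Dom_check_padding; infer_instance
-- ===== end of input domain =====

-- B replaces A's fused index loop by one whole-list comparison of the slices pads[:dim] and
-- pads[dim:2*dim] followed by a single construction branch (objective: simpler). The equivalence
-- proved is about the RETURN value; B performs the same net in-place mutation of padval as A
-- wherever A returns.

-- ===== PORT A =====
-- A's for-loop over range(dim), threading the padval accumulator and the asymmetry flag.
def checkLoopA (pads : List Int) (dim : Int) : List Int → List Int → Bool → Bool
  | [], _, asym => asym
  | i :: rest, padval, asym =>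
    match PySem.List.pyGet? pads i, PySem.List.pyGet? pads (i + dim) with
    | some s, some e =>
      if s == e then
        checkLoopA pads dim rest (padval ++ [s]) asym
      else
        -- asymmetry := True; del padval[:]; padval.extend([0]*dim); break
        true
    | _, _ => asym  -- IndexError: excluded by Pre_check_padding

def check_padding (pads : List Int) (dim : Int) (padval : List Int) : Bool :=
  checkLoopA pads dim (PySem.List.pyRange 0 dim 1) padval false

-- ===== PORT B =====
-- Source B: n = max(dim, 0); starts = pads[:n]; ends = pads[n:2*n]; compare the slices as wholes,
-- then one branch builds padval (mutation only; it does not affect the return value).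
def check_padding_alt (pads : List Int) (dim : Int) (padval : List Int) : Bool :=
  let n : Int := max dim 0
  let starts := PySem.List.slice pads (some 0) (some n)
  let ends := PySem.List.slice pads (some n) (some (2 * n))
  if starts == ends then false else true

-- ===== PRECONDITION & SPEC =====
-- Pre_ excludes exactly the inputs on which A raises IndexError: dim > 0, pads shorter than
-- 2*dim, and every pair the scan can compare before running off the end is symmetric.
def Pre_check_padding (pads : List Int) (dim : Int) (padval : List Int) : Prop :=
  dim ≤ 0 ∨ 2 * dim.toNat ≤ pads.length ∨
    ∃ j : Nat, j < pads.length - dim.toNat ∧ pads.getD j 0 ≠ pads.getD (j + dim.toNat) 0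
instance (pads : List Int) (dim : Int) (padval : List Int) : Decidable (Pre_check_padding pads dim padval) := by unfold Pre_check_padding; infer_instance

def pvWitness_check_padding : List Int × Int × List Int := ([1, 2, 1, 2], 2, [])

def Spec_check_padding (pads : List Int) (dim : Int) (padval : List Int) (out : Bool) : Prop := out = check_padding_alt pads dim padval
instance (pads : List Int) (dim : Int) (padval : List Int) (out : Bool) : Decidable (Spec_check_padding pads dim padval out) := by unfold Spec_check_padding; infer_instance

-- ===== CLAIM (what is proved, stated in full; the proofs are below) =====
def Claim_equal_check_padding : Prop := ∀ (pads : List Int) (dim : Int) (padval : List Int), Dom_check_padding pads dim padval → Pre_check_padding pads dim padval → Spec_check_padding pads dim padval (check_padding pads dim padval)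

-- ===== LEMMAS AND PROOFS =====

-- If all dim pairs are in range and symmetric, A's loop (resumed at any k) returns false.
lemma loopA_false (pads : List Int) (dim : Int) (hd : 0 < dim)
    (h2 : 2 * dim.toNat ≤ pads.length)
    (heq : ∀ i : Nat, i < dim.toNat → pads.getD i 0 = pads.getD (i + dim.toNat) 0) :
    ∀ (m k : Nat) (padv : List Int), dim.toNat ≤ k + m →
      checkLoopA pads dim (PySem.List.pyRange (k : Int) dim 1) padv false = false := by
  intro m
  induction m with
  | zero =>
    intro k padv hk
    rw [PySem.List.pyRange_one_eq_nil (by omega)]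
    rfl
  | succ m ih =>
    intro k padv hk
    by_cases hkd : k < dim.toNat
    · rw [PySem.List.pyRange_one_cons (by omega)]
      have hk1 : k < pads.length := by omega
      have hk2 : k + dim.toNat < pads.length := by omega
      have e1 : PySem.List.pyGet? pads (k : Int) = some pads[k] := by
        rw [PySem.List.pyGet?_natCast]; simp [List.getElem?_eq_getElem hk1]
      have e2 : PySem.List.pyGet? pads ((k : Int) + dim) = some pads[k + dim.toNat] := by
        have : (k : Int) + dim = ((k + dim.toNat : Nat) : Int) := by omega
        rw [this, PySem.List.pyGet?_natCast]; simp [List.getElem?_eq_getElem hk2]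
      have hval : pads[k] = pads[k + dim.toNat] := by
        have := heq k hkd
        rwa [List.getD_eq_getElem _ _ hk1, List.getD_eq_getElem _ _ hk2] at this
      simp only [checkLoopA, e1, e2, hval, beq_self_eq_true, if_true]
      have : ((k : Int) + 1) = ((k + 1 : Nat) : Int) := by omega
      rw [this]
      exact ih (k + 1) _ (by omega)
    · rw [PySem.List.pyRange_one_eq_nil (by omega)]
      rfl

-- If j0 < dim is the first asymmetric (and in-range) pair, A's loop returns true.
lemma loopA_true (pads : List Int) (dim : Int) (hd : 0 < dim) (j0 : Nat)
    (hj0n : j0 < dim.toNat) (hj0L : j0 + dim.toNat < pads.length)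
    (hne : pads.getD j0 0 ≠ pads.getD (j0 + dim.toNat) 0)
    (hpre : ∀ i : Nat, i < j0 → pads.getD i 0 = pads.getD (i + dim.toNat) 0) :
    ∀ (m k : Nat) (padv : List Int), k ≤ j0 → j0 ≤ k + m →
      checkLoopA pads dim (PySem.List.pyRange (k : Int) dim 1) padv false = true := by
  intro m
  induction m with
  | zero =>
    intro k padv hk1 hk2
    have hkj : k = j0 := by omega
    subst hkj
    rw [PySem.List.pyRange_one_cons (by omega)]
    have hk1' : k < pads.length := by omega
    have e1 : PySem.List.pyGet? pads (k : Int) = some pads[k] := by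
      rw [PySem.List.pyGet?_natCast]; simp [List.getElem?_eq_getElem hk1']
    have e2 : PySem.List.pyGet? pads ((k : Int) + dim) = some pads[k + dim.toNat] := by
      have : (k : Int) + dim = ((k + dim.toNat : Nat) : Int) := by omega
      rw [this, PySem.List.pyGet?_natCast]; simp [List.getElem?_eq_getElem hj0L]
    have hval : pads[k] ≠ pads[k + dim.toNat] := by
      rwa [List.getD_eq_getElem _ _ hk1', List.getD_eq_getElem _ _ hj0L] at hne
    simp [checkLoopA, e1, e2, hval]
  | succ m ih =>
    intro k padv hk1 hk2
    by_cases hkj : k = j0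
    · subst hkj
      rw [PySem.List.pyRange_one_cons (by omega)]
      have hk1' : k < pads.length := by omega
      have e1 : PySem.List.pyGet? pads (k : Int) = some pads[k] := by
        rw [PySem.List.pyGet?_natCast]; simp [List.getElem?_eq_getElem hk1']
      have e2 : PySem.List.pyGet? pads ((k : Int) + dim) = some pads[k + dim.toNat] := by
        have : (k : Int) + dim = ((k + dim.toNat : Nat) : Int) := by omega
        rw [this, PySem.List.pyGet?_natCast]; simp [List.getElem?_eq_getElem hj0L]
      have hval : pads[k] ≠ pads[k + dim.toNat] := by
        rwa [List.getD_eq_getElem _ _ hk1', List.getD_eq_getElem _ _ hj0L] at hne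
      simp [checkLoopA, e1, e2, hval]
    · have hklt : k < j0 := by omega
      rw [PySem.List.pyRange_one_cons (by omega)]
      have hk1' : k < pads.length := by omega
      have hk2' : k + dim.toNat < pads.length := by omega
      have e1 : PySem.List.pyGet? pads (k : Int) = some pads[k] := by
        rw [PySem.List.pyGet?_natCast]; simp [List.getElem?_eq_getElem hk1']
      have e2 : PySem.List.pyGet? pads ((k : Int) + dim) = some pads[k + dim.toNat] := by
        have : (k : Int) + dim = ((k + dim.toNat : Nat) : Int) := by omega
        rw [this, PySem.List.pyGet?_natCast]; simp [List.getElem?_eq_getElem hk2']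
      have hval : pads[k] = pads[k + dim.toNat] := by
        have := hpre k hklt
        rwa [List.getD_eq_getElem _ _ hk1', List.getD_eq_getElem _ _ hk2'] at this
      simp only [checkLoopA, e1, e2, hval, beq_self_eq_true, if_true]
      have : ((k : Int) + 1) = ((k + 1 : Nat) : Int) := by omega
      rw [this]
      exact ih (k + 1) _ (by omega) (by omega)

-- B's two slices, for dim > 0, are take/drop-take of pads.
lemma alt_char (pads : List Int) (dim : Int) (padval : List Int) (hd : 0 < dim) :
    check_padding_alt pads dim padval =
      if pads.take dim.toNat = (pads.drop dim.toNat).take dim.toNat then false else true := by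
  have hmax : max dim 0 = dim := by omega
  have h1 : PySem.List.slice pads (some 0) (some dim) = pads.take dim.toNat := by
    rw [PySem.List.slice_toNat pads (by omega) (by omega)]
    simp
  have h2 : PySem.List.slice pads (some dim) (some (2 * dim)) =
      (pads.drop dim.toNat).take dim.toNat := by
    rw [PySem.List.slice_toNat pads (by omega) (by omega)]
    congr 1
    omega
  simp only [check_padding_alt, hmax, h1, h2, beq_iff_eq]

lemma alt_zero (pads : List Int) (dim : Int) (padval : List Int) (hd : dim ≤ 0) :
    check_padding_alt pads dim padval = false := by
  have hmax : max dim 0 = 0 := by omega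
  simp [check_padding_alt, hmax]

-- Whole-slice comparison ↔ pairwise symmetry, when both slices are full length.
lemma take_eq_iff (pads : List Int) (n : Nat) (h2 : 2 * n ≤ pads.length) :
    pads.take n = (pads.drop n).take n ↔
      ∀ j : Nat, j < n → pads.getD j 0 = pads.getD (j + n) 0 := by
  constructor
  · intro h j hj
    have e := congrArg (fun l => l[j]?.getD (0 : Int)) h
    simp only [List.getElem?_take, hj, if_pos, List.getElem?_drop] at e
    rw [List.getD_eq_getElem?_getD, List.getD_eq_getElem?_getD,
      show j + n = n + j from Nat.add_comm _ _]
    exact e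
  · intro h
    apply List.ext_getElem?
    intro i
    simp only [List.getElem?_take, List.getElem?_drop]
    split_ifs with hi
    · have hi1 : i < pads.length := by omega
      have hi2 : n + i < pads.length := by omega
      have := h i hi
      rw [List.getD_eq_getElem?_getD, List.getD_eq_getElem?_getD,
        show i + n = n + i from Nat.add_comm _ _,
        List.getElem?_eq_getElem hi1, List.getElem?_eq_getElem hi2] at this
      rw [List.getElem?_eq_getElem hi1, List.getElem?_eq_getElem hi2]
      simp only [Option.getD_some] at this
      rw [this]
    · rfl

-- ===== VERDICT (by name: the statement is the Claim_ definition above) =====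
theorem check_padding_spec : Claim_equal_check_padding := by
  intro pads dim padval _ hpre
  unfold Spec_check_padding
  by_cases hd : dim ≤ 0
  · rw [alt_zero pads dim padval hd]
    unfold check_padding
    rw [PySem.List.pyRange_one_eq_nil hd]
    rfl
  · replace hd : 0 < dim := by omega
    rw [alt_char pads dim padval hd]
    by_cases hex : ∃ j : Nat, j < dim.toNat ∧ j + dim.toNat < pads.length ∧
        pads.getD j 0 ≠ pads.getD (j + dim.toNat) 0
    · -- asymmetric: both return true
      obtain ⟨j0, hPj0, hminP⟩ :
          ∃ j0 : Nat, (j0 < dim.toNat ∧ j0 + dim.toNat < pads.length ∧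
              pads.getD j0 0 ≠ pads.getD (j0 + dim.toNat) 0) ∧
            ∀ i : Nat, i < j0 → ¬(i < dim.toNat ∧ i + dim.toNat < pads.length ∧
              pads.getD i 0 ≠ pads.getD (i + dim.toNat) 0) :=
        ⟨Nat.find hex, Nat.find_spec hex, fun i hi => Nat.find_min hex hi⟩
      obtain ⟨hj0n, hj0L, hne⟩ := hPj0
      have hmin : ∀ i : Nat, i < j0 → pads.getD i 0 = pads.getD (i + dim.toNat) 0 := by
        intro i hi
        by_contra hc
        exact hminP i hi ⟨by omega, by omega, hc⟩
      have hA : check_padding pads dim padval = true := by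
        unfold check_padding
        have := loopA_true pads dim hd j0 hj0n hj0L hne hmin j0 0 padval (by omega) (by omega)
        simpa using this
      rw [hA]
      by_cases h2 : 2 * dim.toNat ≤ pads.length
      · have hneq : ¬(pads.take dim.toNat = (pads.drop dim.toNat).take dim.toNat) := by
          rw [take_eq_iff pads dim.toNat h2]
          intro hall
          exact hne (hall j0 hj0n)
        rw [if_neg hneq]
      · have hlen : (pads.take dim.toNat).length ≠
            ((pads.drop dim.toNat).take dim.toNat).length := by
          simp only [List.length_take, List.length_drop]
          omega
        rw [if_neg (fun he => hlen (congrArg List.length he))]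
    · -- symmetric: Pre_ forces all 2*dim accesses in range; both return false
      have h2 : 2 * dim.toNat ≤ pads.length := by
        rcases hpre with h | h | ⟨j, hj, hne⟩
        · omega
        · exact h
        · by_contra hL
          exact hex ⟨j, by omega, by omega, hne⟩
      have hall : ∀ i : Nat, i < dim.toNat → pads.getD i 0 = pads.getD (i + dim.toNat) 0 := by
        intro i hi
        by_contra hc
        exact hex ⟨i, hi, by omega, hc⟩
      have hA : check_padding pads dim padval = false := by
        unfold check_padding
        have := loopA_false pads dim hd h2 hall dim.toNat 0 padval (by omega)
        simpa using this
      rw [hA, if_pos ((take_eq_iff pads dim.toNat h2).mpr hall)]
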